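-- pv_equiv track=rewrite | github.com/shfong/w2v_tissues | w2v_tissues/get_tissue_with_w2v.py | consecutive_combinations
-- ===== SOURCE A (Python) =====
-- import itertools as it
--
-- def consecutive_combinations(array, cuts):
--     """Enumerate all possible combination in order with a certain number of breaks"""
--
--     length = len(array)
--     if cuts < 1 or cuts > length:
--         raise ValueError("Number of cuts must be between 1 and the length of the array")
--
--     storage = []
--     for inds in it.combinations(range(length), cuts):
--         if inds[0] != 0:
--             continue
--
--         intermediate = []
--         for i in range(len(inds) - 1):
--             element = '-'.join(array[inds[i]: inds[i+1]])
--             intermediate.append(element)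
--
--         element = '-'.join(array[inds[-1]:])
--         intermediate.append(element)
--
--         storage.append(intermediate)
--
--     return storage
-- ===== SOURCE B (Python) =====
-- import itertools as it
--
-- def consecutive_combinations(array, cuts):
--     """Enumerate all possible combination in order with a certain number of breaks"""
--     length = len(array)
--     if cuts < 1 or cuts > length:
--         raise ValueError("Number of cuts must be between 1 and the length of the array")
--
--     out = []
--     for mids in it.combinations(range(1, length), cuts - 1):
--         bounds = (0,) + mids + (length,)
--         out.append(['-'.join(array[a:b]) for a, b in zip(bounds, bounds[1:])])
--     return out
-- ===== Notes on version B (the rewrite author's own statement) =====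
-- stated objective: alternative
-- what changed: Instead of enumerating all C(n,cuts) combinations of range(n) and discarding those not starting at 0, B enumerates only combinations(range(1,n), cuts-1), prepends 0 and appends n as segment bounds, and builds each row with a zip-pairwise comprehension over the bounds (no filtering pass, no special-cased last segment); it skips the filtered-out candidates but the produced rows dominate the cost.
import Mathlib
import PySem

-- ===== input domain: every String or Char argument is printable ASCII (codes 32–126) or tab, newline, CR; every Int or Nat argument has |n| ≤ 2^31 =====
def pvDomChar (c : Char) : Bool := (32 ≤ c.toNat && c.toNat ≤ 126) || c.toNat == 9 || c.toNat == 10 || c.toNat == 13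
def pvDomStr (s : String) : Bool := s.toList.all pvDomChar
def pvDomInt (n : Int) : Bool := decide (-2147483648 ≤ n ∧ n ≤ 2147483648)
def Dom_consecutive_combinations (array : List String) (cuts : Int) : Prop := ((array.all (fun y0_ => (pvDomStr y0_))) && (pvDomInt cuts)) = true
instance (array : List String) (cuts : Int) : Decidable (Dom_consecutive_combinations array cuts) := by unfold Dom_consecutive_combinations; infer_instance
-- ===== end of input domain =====

-- B replaces A's enumerate-all-then-filter with direct enumeration of the cut points
-- combinations(range(1,n), cuts-1), building each row pairwise over the bounds 0::mids++[n]; objective: alternative.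

-- ===== PORT A =====
def consecutive_combinations (array : List String) (cuts : Int) : List (List String) :=
  let length : Int := array.length
  if cuts < 1 ∨ cuts > length then []  -- Python raises ValueError here; excluded by Pre_
  else
    (PySem.List.combinations (PySem.List.pyRange 0 length 1) cuts.toNat).foldl
      (fun storage inds =>
        if PySem.List.pyGetD inds 0 0 ≠ 0 then storage  -- inds[0]: inds is nonempty under the guard, so pyGetD is exact
        else
          let intermediate :=
            (PySem.List.pyRange 0 ((inds.length : Int) - 1) 1).foldl
              (fun inter i =>
                inter ++ [PySem.Str.join "-"
                  (PySem.List.slice array (some (PySem.List.pyGetD inds i 0)) (some (PySem.List.pyGetD inds (i+1) 0)))]) []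
          storage ++ [intermediate ++ [PySem.Str.join "-" (PySem.List.slice array (some (PySem.List.pyGetD inds (-1) 0)) none)]])
      []

-- ===== PORT B =====
def consecutive_combinations_alt (array : List String) (cuts : Int) : List (List String) :=
  let length : Int := array.length
  if cuts < 1 ∨ cuts > length then []  -- Python raises ValueError here; excluded by Pre_
  else
    (PySem.List.combinations (PySem.List.pyRange 1 length 1) (cuts - 1).toNat).map
      (fun mids =>
        let bounds : List Int := 0 :: (mids ++ [length])
        (bounds.zip bounds.tail).map
          (fun ab => PySem.Str.join "-" (PySem.List.slice array (some ab.1) (some ab.2))))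

-- ===== PRECONDITION & SPEC =====
-- A raises ValueError exactly when cuts < 1 or cuts > len(array); Pre_ excludes exactly those inputs.
def Pre_consecutive_combinations (array : List String) (cuts : Int) : Prop :=
  1 ≤ cuts ∧ cuts ≤ (array.length : Int)
instance (array : List String) (cuts : Int) : Decidable (Pre_consecutive_combinations array cuts) := by
  unfold Pre_consecutive_combinations; infer_instance

def pvWitness_consecutive_combinations : List String × Int := (["ab", "cd", "e"], 2)

def Spec_consecutive_combinations (array : List String) (cuts : Int) (out : List (List String)) : Prop := out = consecutive_combinations_alt array cuts
instance (array : List String) (cuts : Int) (out : List (List String)) : Decidable (Spec_consecutive_combinations array cuts out) := by unfold Spec_consecutive_combinations; infer_instance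

-- ===== CLAIM (what is proved, stated in full; the proofs are below) =====
def Claim_equal_consecutive_combinations : Prop := ∀ (array : List String) (cuts : Int), Dom_consecutive_combinations array cuts → Pre_consecutive_combinations array cuts → Spec_consecutive_combinations array cuts (consecutive_combinations array cuts)

-- ===== LEMMAS AND PROOFS =====

-- A's inner indexed loop over range(len(inds)-1) is the pairwise map over (inds, inds.tail).
lemma range_pairs {β : Type} (F : Int → Int → β) (inds : List Int) :
    (List.range (inds.length - 1)).map (fun k => F (inds.getD k 0) (inds.getD (k+1) 0))
      = (inds.zip inds.tail).map (fun ab => F ab.1 ab.2) := by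
  induction inds with
  | nil => simp
  | cons a t ih =>
    cases t with
    | nil => simp
    | cons b t' =>
      have h : (a :: b :: t').length - 1 = (b :: t').length - 1 + 1 := by simp
      rw [h, List.range_succ_eq_map]
      simp only [List.map_cons, List.map_map, List.tail_cons, List.zip_cons_cons]
      refine congrArg₂ List.cons rfl ?_
      simp only [List.tail_cons] at ih
      rw [← ih]
      exact List.map_congr_left fun k _ => rfl

lemma zip_tail_append_last (l : List Int) (z : Int) (h : l ≠ []) :
    (l ++ [z]).zip ((l ++ [z]).tail) = l.zip l.tail ++ [(l.getLast h, z)] := by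
  induction l with
  | nil => exact absurd rfl h
  | cons a t ih =>
    cases t with
    | nil => simp
    | cons b t' =>
      have hbt : (b :: t') ≠ [] := by simp
      have ih' := ih hbt
      simp only [List.cons_append, List.zip_cons_cons, List.tail_cons] at ih' ⊢
      rw [List.getLast_cons hbt, ih']

-- slicing to exactly len(array) equals the open-ended slice, for a nonnegative start
lemma slice_to_length (array : List String) (a : Int) (ha : 0 ≤ a) :
    PySem.List.slice array (some a) (some (array.length : Int))
      = PySem.List.slice array (some a) none := by
  have hb : (0:Int) ≤ (array.length : Int) := by positivity
  rw [PySem.List.slice_toNat array ha hb, PySem.List.slice_from array ha]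
  apply List.take_of_length_le
  simp

-- A's row for the combination 0 :: mids equals B's pairwise row over the bounds 0 :: mids ++ [len]
lemma row_eq (array : List String) (mids : List Int)
    (hm : ∀ x ∈ mids, 0 ≤ x) :
    ((PySem.List.pyRange 0 (((0 :: mids).length : Int) - 1) 1).foldl
        (fun inter i =>
          inter ++ [PySem.Str.join "-"
            (PySem.List.slice array (some (PySem.List.pyGetD (0 :: mids) i 0)) (some (PySem.List.pyGetD (0 :: mids) (i+1) 0)))]) [])
      ++ [PySem.Str.join "-" (PySem.List.slice array (some (PySem.List.pyGetD (0 :: mids) (-1) 0)) none)]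
    = ((0 :: (mids ++ [(array.length : Int)])).zip (0 :: (mids ++ [(array.length : Int)])).tail).map
        (fun ab => PySem.Str.join "-" (PySem.List.slice array (some ab.1) (some ab.2))) := by
  set F : Int → Int → String := fun a b => PySem.Str.join "-" (PySem.List.slice array (some a) (some b)) with hF
  have hne : (0 :: mids : List Int) ≠ [] := by simp
  rw [PySem.List.foldl_append_singleton_eq_map, List.nil_append]
  have hlen : (((0 :: mids).length : Int) - 1) = ((mids.length : Nat) : Int) := by simp
  rw [hlen, PySem.List.pyRange_zero_nat]
  simp only [List.map_map, Function.comp_def]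
  have hmap :
      (List.range mids.length).map (fun (k : Nat) =>
          PySem.Str.join "-" (PySem.List.slice array (some (PySem.List.pyGetD (0 :: mids) ((k : Nat) : Int) 0))
            (some (PySem.List.pyGetD (0 :: mids) (((k : Nat) : Int)+1) 0))))
        = ((0 :: mids).zip (0 :: mids).tail).map (fun ab => F ab.1 ab.2) := by
    rw [← range_pairs F (0 :: mids)]
    simp only [List.length_cons, Nat.add_sub_cancel]
    apply List.map_congr_left
    intro k _
    have h1 : ((k : Int) + 1) = (((k + 1 : Nat)) : Int) := by push_cast; ring
    rw [h1, PySem.List.pyGetD_natCast, PySem.List.pyGetD_natCast]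
  rw [hmap]
  have hlast : PySem.List.pyGetD (0 :: mids) (-1) 0 = (0 :: mids).getLast hne :=
    PySem.List.pyGetD_neg_one (0 :: mids) 0 hne
  have hcons : (0 :: (mids ++ [(array.length : Int)])) = (0 :: mids) ++ [(array.length : Int)] := by simp
  rw [hcons, zip_tail_append_last (0 :: mids) (array.length : Int) hne, List.map_append]
  simp only [List.map_cons, List.map_nil]
  congr 1
  rw [hlast]
  have h0 : 0 ≤ (0 :: mids).getLast hne := by
    have hmem := List.getLast_mem hne
    rcases List.mem_cons.mp hmem with h | h
    · omega
    · exact hm _ h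
  rw [← slice_to_length array _ h0]

-- ===== VERDICT (by name: the statement is the Claim_ definition above) =====
theorem consecutive_combinations_spec : Claim_equal_consecutive_combinations := by
  intro array cuts _ hpre
  obtain ⟨h1, h2⟩ := hpre
  unfold Spec_consecutive_combinations consecutive_combinations consecutive_combinations_alt
  have hguard : ¬ (cuts < 1 ∨ cuts > (array.length : Int)) := by omega
  simp only [if_neg hguard]
  have hLpos : (0:Int) < (array.length : Int) := by omega
  set k : Nat := (cuts - 1).toNat with hk
  have hct : cuts.toNat = k + 1 := by omega
  rw [hct]
  rw [PySem.List.pyRange_one_cons hLpos, PySem.List.combinations_cons_succ, List.foldl_append]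
  simp only [zero_add]
  set R : List Int := PySem.List.pyRange 1 (array.length : Int) 1 with hR
  have hRmem : ∀ x ∈ R, 1 ≤ x ∧ x < (array.length : Int) := by
    intro x hx
    rw [hR, PySem.List.mem_pyRange_one] at hx
    exact hx
  have hskip : ∀ (acc : List (List String)),
      (PySem.List.combinations R (k+1)).foldl
        (fun storage inds =>
          if PySem.List.pyGetD inds 0 0 ≠ 0 then storage
          else storage ++ [((PySem.List.pyRange 0 ((inds.length : Int) - 1) 1).foldl
              (fun inter i => inter ++ [PySem.Str.join "-"
                (PySem.List.slice array (some (PySem.List.pyGetD inds i 0)) (some (PySem.List.pyGetD inds (i+1) 0)))]) [])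
            ++ [PySem.Str.join "-" (PySem.List.slice array (some (PySem.List.pyGetD inds (-1) 0)) none)]]) acc = acc := by
    intro acc
    rw [PySem.List.foldl_congr_mem (g := fun acc _ => acc), PySem.List.foldl_ignore]
    intro a inds hinds
    have hlen := PySem.List.length_of_mem_combinations hinds
    have hsub := PySem.List.sublist_of_mem_combinations hinds
    cases inds with
    | nil => simp at hlen
    | cons h t =>
      have hmem : h ∈ R := hsub.subset (by simp)
      have hge := (hRmem h hmem).1
      rw [if_pos]
      rw [PySem.List.pyGetD_zero_cons]
      omega
  rw [hskip]
  rw [List.foldl_map, PySem.List.foldl_congr_mem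
    (g := fun (storage : List (List String)) (mids : List Int) =>
      storage ++ [((0 :: (mids ++ [(array.length : Int)])).zip (0 :: (mids ++ [(array.length : Int)])).tail).map
        (fun ab => PySem.Str.join "-" (PySem.List.slice array (some ab.1) (some ab.2)))])]
  · rw [PySem.List.foldl_append_singleton_eq_map, List.nil_append]
  · intro acc mids hmids
    have hsub := PySem.List.sublist_of_mem_combinations hmids
    have hm : ∀ x ∈ mids, 0 ≤ x := fun x hx => by
      have := (hRmem x (hsub.subset hx)).1; omega
    rw [if_neg (by rw [PySem.List.pyGetD_zero_cons]; simp)]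
    rw [row_eq array mids hm]
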